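-- pv_equiv track=rewrite | github.com/Antakathena/OC_P4 | P4models.py | sort_by_score_and_rating
-- ===== SOURCE A (Python) =====
-- import itertools
--
-- def sort_by_score_and_rating(players_by_scores):
--     # trouver les joueurs avec le même score:
--     def get_score(player):
--         return player["total_score"]
--     players_group = itertools.groupby(players_by_scores, get_score)
--
--     # trier ceux avec un score égal selon leur classement:
--     groups = []  # -> liste de listes correspondant aux joueurs qui ont eu le même score
--     for _, group in players_group:
--         groups.append(list(group))
--
--     sorted_list_by_score_and_rating = []  # -> dict des joueurs trié par scores égaux et classement
--     for group in groups:
--         order_by_rating = sorted((group), key=lambda k: k["rating"], reverse=True)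
--         for j in order_by_rating:
--             sorted_list_by_score_and_rating.append(j)
--     return sorted_list_by_score_and_rating
-- ===== SOURCE B (Python) =====
-- def sort_by_score_and_rating(players_by_scores):
--     # Single fused pass: keep the current consecutive-score run as a list that is
--     # maintained sorted by rating (descending, stable) via insertion; flush it to
--     # the output whenever the score changes. No groupby, no list-of-groups, no sorted().
--     out = []
--     run = []          # current run, already sorted by rating desc (ties keep arrival order)
--     prev = None
--     started = False
--     for p in players_by_scores:
--         s = p["total_score"]
--         if not (started and s == prev):
--             out.extend(run)
--             run = []
--         i = 0
--         while i < len(run) and run[i]["rating"] >= p["rating"]: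
--             i += 1
--         run.insert(i, p)
--         prev = s
--         started = True
--     out.extend(run)
--     return out
-- ===== Notes on version B (the rewrite author's own statement) =====
-- stated objective: alternative
-- what changed: Replaces groupby-into-a-list-of-groups plus a sorted() call per group by one fused forward pass that keeps the current consecutive-score run sorted by rating (descending, stable) through insertion and flushes it when the score changes.
import Mathlib
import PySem

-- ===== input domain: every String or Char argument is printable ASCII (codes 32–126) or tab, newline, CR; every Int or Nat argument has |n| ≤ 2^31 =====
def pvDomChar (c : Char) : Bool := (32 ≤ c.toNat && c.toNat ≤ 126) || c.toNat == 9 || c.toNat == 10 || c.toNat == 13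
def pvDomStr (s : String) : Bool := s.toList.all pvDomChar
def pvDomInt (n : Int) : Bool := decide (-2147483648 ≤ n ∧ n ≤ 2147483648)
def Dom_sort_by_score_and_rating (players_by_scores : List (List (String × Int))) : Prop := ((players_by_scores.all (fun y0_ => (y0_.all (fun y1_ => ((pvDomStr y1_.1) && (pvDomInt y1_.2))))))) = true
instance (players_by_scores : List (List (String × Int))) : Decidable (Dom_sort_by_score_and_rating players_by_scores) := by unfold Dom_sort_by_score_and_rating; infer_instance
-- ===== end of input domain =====

-- B replaces groupby + per-group sorted() by one fused pass that keeps the current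
-- consecutive-score run sorted by rating (descending, stable) via insertion (objective: alternative).

-- ===== PORT A =====
-- dict access p["total_score"] / p["rating"]: first-match lookup in the association list.
-- Pre_ guarantees the key is present; the .getD 0 default is never reached inside Pre_.
def pvScore (p : List (String × Int)) : Int := (List.lookup "total_score" p).getD 0
def pvRating (p : List (String × Int)) : Int := (List.lookup "rating" p).getD 0

-- itertools.groupby(players, get_score) materialised as consecutive runs of equal score
def pvRunsAux (k : Int) (cur : List (List (String × Int))) :
    List (List (String × Int)) → List (List (List (String × Int)))
  | [] => [cur]
  | p :: rest =>
      if pvScore p = k then pvRunsAux k (cur ++ [p]) rest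
      else cur :: pvRunsAux (pvScore p) [p] rest

def pvRuns : List (List (String × Int)) → List (List (List (String × Int)))
  | [] => []
  | p :: rest => pvRunsAux (pvScore p) [p] rest

def sort_by_score_and_rating (players_by_scores : List (List (String × Int))) : List (List (String × Int)) :=
  let groups := pvRuns players_by_scores
  groups.foldl
    (fun acc group =>
      (PySem.List.sorted group (fun j => pvRating j) true).foldl (fun a j => a ++ [j]) acc)
    []

-- ===== PORT B =====
-- stable descending insertion: p goes after every entry whose rating is ≥ its own
def pvInsDesc (p : List (String × Int)) : List (List (String × Int)) → List (List (String × Int))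
  | [] => [p]
  | q :: qs => if pvRating q ≥ pvRating p then q :: pvInsDesc p qs else p :: q :: qs

def pvStepB (st : List (List (String × Int)) × List (List (String × Int)) × Option Int)
    (p : List (String × Int)) :
    List (List (String × Int)) × List (List (String × Int)) × Option Int :=
  let s := pvScore p
  let flushed := if st.2.2 = some s then (st.1, st.2.1) else (st.1 ++ st.2.1, ([] : List (List (String × Int))))
  (flushed.1, pvInsDesc p flushed.2, some s)

def sort_by_score_and_rating_alt (players_by_scores : List (List (String × Int))) : List (List (String × Int)) :=
  let st := players_by_scores.foldl pvStepB ([], [], none)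
  st.1 ++ st.2.1

-- ===== PRECONDITION & SPEC =====
-- Pre_: every player dict carries the keys "total_score" and "rating"; on any other
-- input the Python A raises KeyError (groupby's key function / sorted's key function).
def Pre_sort_by_score_and_rating (players_by_scores : List (List (String × Int))) : Prop :=
  (players_by_scores.all (fun p =>
    (List.lookup "total_score" p).isSome && (List.lookup "rating" p).isSome)) = true
instance (players_by_scores : List (List (String × Int))) : Decidable (Pre_sort_by_score_and_rating players_by_scores) := by unfold Pre_sort_by_score_and_rating; infer_instance

def pvWitness_sort_by_score_and_rating : (List (List (String × Int))) :=
  [[("total_score", 3), ("rating", 7)], [("total_score", 3), ("rating", 9)], [("total_score", 1), ("rating", 2)]]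

def Spec_sort_by_score_and_rating (players_by_scores : List (List (String × Int))) (out : List (List (String × Int))) : Prop := out = sort_by_score_and_rating_alt players_by_scores
instance (players_by_scores : List (List (String × Int))) (out : List (List (String × Int))) : Decidable (Spec_sort_by_score_and_rating players_by_scores out) := by unfold Spec_sort_by_score_and_rating; infer_instance

-- ===== CLAIM (what is proved, stated in full; the proofs are below) =====
def Claim_equal_sort_by_score_and_rating : Prop := ∀ (players_by_scores : List (List (String × Int))), Dom_sort_by_score_and_rating players_by_scores → Pre_sort_by_score_and_rating players_by_scores → Spec_sort_by_score_and_rating players_by_scores (sort_by_score_and_rating players_by_scores)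

-- ===== LEMMAS AND PROOFS =====

-- B's hand-written insertion is exactly PySem's insertBy with the reverse=True predicate
theorem pvInsDesc_eq_insertBy (p : List (String × Int)) (run : List (List (String × Int))) :
    pvInsDesc p run = PySem.List.insertBy (fun a b => decide (pvRating b < pvRating a)) p run := by
  induction run with
  | nil => rfl
  | cons q qs ih =>
      simp only [pvInsDesc, PySem.List.insertBy, ih]
      by_cases h : pvRating q < pvRating p
      · rw [if_neg (by omega), if_pos (by simpa using h)]
      · rw [if_pos (by omega), if_neg (by simpa using h)]

def pvFoldIns (cur : List (List (String × Int))) : List (List (String × Int)) :=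
  cur.foldl (fun acc p => pvInsDesc p acc) []

theorem pvFoldIns_eq_sorted (cur : List (List (String × Int))) :
    pvFoldIns cur = PySem.List.sorted cur (fun j => pvRating j) true := by
  rw [PySem.List.sorted_rev_eq_foldl_insertBy]
  simp only [pvFoldIns, pvInsDesc_eq_insertBy]

theorem pvFoldIns_snoc (cur : List (List (String × Int))) (p : List (String × Int)) :
    pvFoldIns (cur ++ [p]) = pvInsDesc p (pvFoldIns cur) := by
  simp [pvFoldIns, List.foldl_append]

def pvFlushA (out : List (List (String × Int))) (gs : List (List (List (String × Int)))) :
    List (List (String × Int)) :=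
  gs.foldl
    (fun acc group =>
      (PySem.List.sorted group (fun j => pvRating j) true).foldl (fun a j => a ++ [j]) acc)
    out

theorem pvFlushA_cons (out : List (List (String × Int))) (g : List (List (String × Int)))
    (gs : List (List (List (String × Int)))) :
    pvFlushA out (g :: gs) = pvFlushA (out ++ PySem.List.sorted g (fun j => pvRating j) true) gs := by
  simp only [pvFlushA, List.foldl_cons, PySem.List.foldl_append_singleton]

-- main invariant: B's fused fold, started mid-run, computes A's flush of the remaining runs
theorem pvMain (xs : List (List (String × Int))) :
    ∀ (k : Int) (cur out : List (List (String × Int))),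
    (xs.foldl pvStepB (out, pvFoldIns cur, some k)).1
      ++ (xs.foldl pvStepB (out, pvFoldIns cur, some k)).2.1
      = pvFlushA out (pvRunsAux k cur xs) := by
  induction xs with
  | nil =>
      intro k cur out
      simp only [List.foldl_nil, pvRunsAux, pvFlushA, List.foldl_cons,
        PySem.List.foldl_append_singleton, pvFoldIns_eq_sorted]
  | cons p rest ih =>
      intro k cur out
      by_cases h : pvScore p = k
      · have hstep : pvStepB (out, pvFoldIns cur, some k) p
            = (out, pvFoldIns (cur ++ [p]), some k) := by
          simp [pvStepB, pvFoldIns_snoc, h]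
        simp only [List.foldl_cons, hstep, pvRunsAux, if_pos h]
        exact ih k (cur ++ [p]) out
      · have hstep : pvStepB (out, pvFoldIns cur, some k) p
            = (out ++ pvFoldIns cur, pvFoldIns [p], some (pvScore p)) := by
          have : ¬ (some k = some (pvScore p)) := by
            intro hc; exact h (Option.some.inj hc).symm
          simp [pvStepB, this, pvFoldIns]
        simp only [List.foldl_cons, hstep, pvRunsAux, if_neg h]
        rw [ih (pvScore p) [p] (out ++ pvFoldIns cur), pvFlushA_cons, pvFoldIns_eq_sorted]

-- ===== VERDICT (by name: the statement is the Claim_ definition above) =====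
theorem sort_by_score_and_rating_spec : Claim_equal_sort_by_score_and_rating := by
  intro players _ _
  unfold Spec_sort_by_score_and_rating sort_by_score_and_rating sort_by_score_and_rating_alt
  cases players with
  | nil => rfl
  | cons p rest =>
      have hstep : pvStepB (([] : List (List (String × Int))), ([] : List (List (String × Int))), (none : Option Int)) p
          = ([], pvFoldIns [p], some (pvScore p)) := by
        simp [pvStepB, pvFoldIns]
      simp only [pvRuns, List.foldl_cons, hstep]
      exact (pvMain rest (pvScore p) [p] []).symm
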